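-- pv_equiv track=rewrite | github.com/fogleman/FeedNotifier | util.py | pretty_name
-- ===== SOURCE A (Python) =====
-- def pretty_name(name):
--     name = ' '.join(s.title() for s in name.split('_'))
--     last = '0'
--     result = ''
--     for c in name:
--         if c.isdigit() and not last.isdigit():
--             result += ' '
--         result += c
--         last = c
--     return result
-- ===== SOURCE B (Python) =====
-- def pretty_name(name):
--     name = ' '.join(s.title() for s in name.split('_'))
--     out = []
--     i, n = 0, len(name)
--     while i < n:
--         d = name[i].isdigit()
--         j = i
--         while j < n and name[j].isdigit() == d:
--             j += 1
--         if d and i > 0: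
--             out.append(' ')
--         out.append(name[i:j])
--         i = j
--     return ''.join(out)
-- ===== Notes on version B (the rewrite author's own statement) =====
-- stated objective: alternative
-- what changed: Replaced A's char-by-char state machine (tracking the previous character) with a two-index run scanner that emits whole maximal digit/non-digit runs, prepending a space to every digit run that is not at the start.
import Mathlib
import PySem

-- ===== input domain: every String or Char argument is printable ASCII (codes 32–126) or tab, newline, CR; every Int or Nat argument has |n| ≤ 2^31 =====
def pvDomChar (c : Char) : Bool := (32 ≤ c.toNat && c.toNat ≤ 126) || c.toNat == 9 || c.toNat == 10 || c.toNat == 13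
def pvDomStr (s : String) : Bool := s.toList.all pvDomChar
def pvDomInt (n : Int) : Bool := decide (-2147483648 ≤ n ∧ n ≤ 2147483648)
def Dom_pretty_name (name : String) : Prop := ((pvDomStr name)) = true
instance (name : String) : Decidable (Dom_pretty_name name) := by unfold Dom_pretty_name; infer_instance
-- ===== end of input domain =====

-- B replaces A's char-by-char state machine with a two-index run scanner that emits
-- whole digit/non-digit runs (objective: alternative decomposition, same cost).

-- hand port of str.title(), exact on ASCII: a letter after a non-letter is uppercased,
-- a letter after a letter is lowercased, other chars pass through (shared first line of A and B)
def titleGo (prevCased : Bool) : List Char → List Char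
  | [] => []
  | c :: cs =>
    (if PySem.Chars.isalpha c then
        (if prevCased then PySem.Chars.lowerChar c else PySem.Chars.upperChar c)
      else c) :: titleGo (PySem.Chars.isalpha c) cs

def titleChars (cs : List Char) : List Char := titleGo false cs

-- first line of both Pythons: ' '.join(s.title() for s in name.split('_'))
def titledJoin (name : String) : List Char :=
  PySem.Chars.join [' '] ((PySem.Chars.splitOn name.toList ['_']).map titleChars)

-- ===== PORT A =====
def pretty_name (name : String) : String :=
  let cs := titledJoin name
  let st := cs.foldl
    (fun (acc : List Char × Char) c =>
      let r := if PySem.Chars.isdigit c && !PySem.Chars.isdigit acc.2 then acc.1 ++ [' '] else acc.1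
      (r ++ [c], c))
    ([], '0')
  String.ofList st.1

-- ===== PORT B =====
-- run scanner: take the maximal run of same digit-ness, emit it (with a leading space
-- for a digit run that is not first), recurse on the rest
def runsGo (cs : List Char) (first : Bool) : List Char :=
  match cs with
  | [] => []
  | c :: rest =>
    let d := PySem.Chars.isdigit c
    let run := c :: rest.takeWhile (fun x => PySem.Chars.isdigit x == d)
    let tail := rest.dropWhile (fun x => PySem.Chars.isdigit x == d)
    (if d && !first then ' ' :: run else run) ++ runsGo tail false
termination_by cs.length
decreasing_by
  exact Nat.lt_succ_of_le (List.length_dropWhile_le _ _)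

def pretty_name_alt (name : String) : String :=
  String.ofList (runsGo (titledJoin name) true)

-- ===== PRECONDITION & SPEC =====
def Spec_pretty_name (name : String) (out : String) : Prop := out = pretty_name_alt name
instance (name : String) (out : String) : Decidable (Spec_pretty_name name out) := by unfold Spec_pretty_name; infer_instance

-- ===== CLAIM (what is proved, stated in full; the proofs are below) =====
def Claim_equal_pretty_name : Prop := ∀ (name : String), Dom_pretty_name name → Spec_pretty_name name (pretty_name name)

-- ===== LEMMAS AND PROOFS =====

-- equation lemmas for runsGo (well-founded definition)
theorem runsGo_nil (first : Bool) : runsGo [] first = [] := by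
  rw [runsGo]

theorem runsGo_cons (c : Char) (rest : List Char) (first : Bool) :
    runsGo (c :: rest) first =
      (if PySem.Chars.isdigit c && !first
        then ' ' :: c :: rest.takeWhile (fun x => PySem.Chars.isdigit x == PySem.Chars.isdigit c)
        else c :: rest.takeWhile (fun x => PySem.Chars.isdigit x == PySem.Chars.isdigit c)) ++
      runsGo (rest.dropWhile (fun x => PySem.Chars.isdigit x == PySem.Chars.isdigit c)) false := by
  rw [runsGo]

-- A's loop, purified: state is the digit-ness of the previous char
def loopA (lastD : Bool) : List Char → List Char
  | [] => []
  | c :: cs =>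
    (if PySem.Chars.isdigit c && !lastD then [' ', c] else [c]) ++ loopA (PySem.Chars.isdigit c) cs

theorem foldl_eq_loopA (cs : List Char) : ∀ (acc : List Char) (last : Char),
    (cs.foldl
      (fun (acc : List Char × Char) c =>
        let r := if PySem.Chars.isdigit c && !PySem.Chars.isdigit acc.2 then acc.1 ++ [' '] else acc.1
        (r ++ [c], c))
      (acc, last)).1 = acc ++ loopA (PySem.Chars.isdigit last) cs := by
  induction cs with
  | nil => intro acc last; simp [loopA]
  | cons c cs ih =>
    intro acc last
    simp only [List.foldl_cons, loopA, ih]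
    split_ifs <;> simp

theorem loopA_run (r : List Char) (d : Bool) (t : List Char)
    (h : ∀ x ∈ r, PySem.Chars.isdigit x = d) :
    loopA d (r ++ t) = r ++ loopA d t := by
  induction r with
  | nil => simp
  | cons x r ih =>
    have hx : PySem.Chars.isdigit x = d := h x (List.mem_cons_self ..)
    simp [loopA, hx, ih (fun y hy => h y (List.mem_cons_of_mem _ hy))]

theorem head_dropWhile {p : Char → Bool} : ∀ (l : List Char) (c : Char),
    (l.dropWhile p).head? = some c → p c = false := by
  intro l
  induction l with
  | nil => intro c h; simp [List.dropWhile] at h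
  | cons x xs ih =>
    intro c h
    by_cases hx : p x = true
    · exact ih c (by simpa [List.dropWhile, hx] using h)
    · simp only [List.dropWhile, Bool.eq_false_iff.mpr hx] at h
      simp at h
      rw [← h]
      exact Bool.eq_false_iff.mpr hx

theorem loopA_eq_runsGo : ∀ (n : ℕ) (cs : List Char) (lastD first : Bool),
    cs.length ≤ n →
    (first = true → lastD = true) →
    (first = false → ∀ c, cs.head? = some c → PySem.Chars.isdigit c = !lastD) →
    loopA lastD cs = runsGo cs first := by
  intro n
  induction n with
  | zero =>
    intro cs lastD first hn _ _
    have : cs = [] := List.length_eq_zero_iff.mp (Nat.le_zero.mp hn)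
    subst this
    simp [loopA, runsGo_nil]
  | succ n ih =>
    intro cs lastD first hn h1 h2
    match cs with
    | [] => simp [loopA, runsGo_nil]
    | c :: rest =>
      have hsplit : rest = rest.takeWhile (fun x => PySem.Chars.isdigit x == PySem.Chars.isdigit c)
          ++ rest.dropWhile (fun x => PySem.Chars.isdigit x == PySem.Chars.isdigit c) :=
        (List.takeWhile_append_dropWhile ..).symm
      have hrun : ∀ x ∈ rest.takeWhile (fun x => PySem.Chars.isdigit x == PySem.Chars.isdigit c),
          PySem.Chars.isdigit x = PySem.Chars.isdigit c := by
        intro x hx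
        have := List.mem_takeWhile_imp hx
        exact beq_iff_eq.mp this
      have step : loopA lastD (c :: rest) =
          (if PySem.Chars.isdigit c && !lastD then [' ', c] else [c])
          ++ (rest.takeWhile (fun x => PySem.Chars.isdigit x == PySem.Chars.isdigit c)
              ++ loopA (PySem.Chars.isdigit c)
                  (rest.dropWhile (fun x => PySem.Chars.isdigit x == PySem.Chars.isdigit c))) := by
        conv_lhs => rw [loopA, hsplit]
        rw [loopA_run _ _ _ hrun]
      have cond : (PySem.Chars.isdigit c && !lastD) = (PySem.Chars.isdigit c && !first) := by
        cases first with
        | true => rw [h1 rfl]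
        | false =>
          have hh := h2 rfl c rfl
          rw [hh]
          cases lastD <;> rfl
      have tail_eq : loopA (PySem.Chars.isdigit c)
            (rest.dropWhile (fun x => PySem.Chars.isdigit x == PySem.Chars.isdigit c))
          = runsGo (rest.dropWhile (fun x => PySem.Chars.isdigit x == PySem.Chars.isdigit c)) false := by
        apply ih _ _ false
        · have hle := List.length_dropWhile_le (fun x => PySem.Chars.isdigit x == PySem.Chars.isdigit c) rest
          have : (c :: rest).length = rest.length + 1 := rfl
          omega
        · intro h; cases h
        · intro _ x hx
          have hpx := head_dropWhile rest x hx
          have hne : PySem.Chars.isdigit x ≠ PySem.Chars.isdigit c := by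
            intro he; rw [he] at hpx; simp at hpx
          cases hdx : PySem.Chars.isdigit x <;> cases hdc2 : PySem.Chars.isdigit c <;>
            first
              | rfl
              | (exfalso; rw [hdx, hdc2] at hne; exact hne rfl)
      rw [step, tail_eq, runsGo_cons, cond]
      split_ifs <;> rfl

-- ===== VERDICT (by name: the statement is the Claim_ definition above) =====
theorem pretty_name_spec : Claim_equal_pretty_name := by
  intro name _
  unfold Spec_pretty_name pretty_name pretty_name_alt
  simp only
  congr 1
  rw [foldl_eq_loopA]
  simp only [List.nil_append]
  exact loopA_eq_runsGo (titledJoin name).length (titledJoin name)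
    (PySem.Chars.isdigit '0') true rfl.le (fun _ => rfl) (by intro h; cases h)
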